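-- pv_equiv track=rewrite | github.com/frndmg/advent-of-code-2021 | day3/py/sol2.py | get_column_occurrences
-- ===== SOURCE A (Python) =====
-- import collections as colls
--
-- def get_column_occurrences(report, column_set: set[int] =None):
--     if column_set is None:
--         column_set = set(range(report[0]))
--     else:
--         column_set = set(column_set)
--
--     counters = {c: colls.Counter() for c in column_set}
--
--     for row in report:
--         for j, x in enumerate(row):
--             if j not in column_set:
--                 continue
--             counters[j][x] += 1
--
--     return counters
-- ===== SOURCE B (Python) =====
-- import collections as colls
--
-- def get_column_occurrences(report, column_set=None):
--     if column_set is None: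
--         column_set = set(range(report[0]))
--     else:
--         column_set = set(column_set)
--
--     return {c: colls.Counter(row[c] for row in report if 0 <= c < len(row))
--             for c in column_set}
-- ===== Notes on version B (the rewrite author's own statement) =====
-- stated objective: alternative
-- what changed: B swaps the loop nesting: instead of one pass over rows that increments every selected column's Counter via enumerate, B builds each column's Counter independently with a dict comprehension over the column set, scanning the rows once per column with a bounds guard.
import Mathlib
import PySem

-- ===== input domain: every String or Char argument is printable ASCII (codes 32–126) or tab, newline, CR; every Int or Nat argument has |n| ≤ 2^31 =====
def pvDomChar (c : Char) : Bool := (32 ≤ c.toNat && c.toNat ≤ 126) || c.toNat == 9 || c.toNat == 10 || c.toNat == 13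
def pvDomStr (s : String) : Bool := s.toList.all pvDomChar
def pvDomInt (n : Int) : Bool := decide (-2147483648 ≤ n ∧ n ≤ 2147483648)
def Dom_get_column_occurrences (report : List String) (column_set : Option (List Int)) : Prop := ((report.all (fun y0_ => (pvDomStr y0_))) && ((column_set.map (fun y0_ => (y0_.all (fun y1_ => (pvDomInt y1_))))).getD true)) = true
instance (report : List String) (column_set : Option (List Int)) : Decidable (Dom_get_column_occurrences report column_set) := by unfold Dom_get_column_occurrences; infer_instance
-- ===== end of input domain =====

-- B builds each selected column's Counter independently (outer loop over columns, inner over rows)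
-- instead of A's single row pass that increments all column Counters via enumerate; same results.

-- ===== PORT A =====
-- A's inner loop body: for (j, x) in enumerate(row): skip j not in column_set, else counters[j][x] += 1
def pvStepA (s : PySem.Set Int) (d : PySem.Dict Int (PySem.Dict String Int)) (jx : Int × Char) :
    PySem.Dict Int (PySem.Dict String Int) :=
  if PySem.Set.contains s jx.1 then
    d.modify jx.1 PySem.Dict.empty (fun cnt => cnt.modify (String.ofList [jx.2]) 0 (· + 1))
  else d

def get_column_occurrences (report : List String) (column_set : Option (List Int)) :
    List (Int × List (String × Int)) :=
  match column_set with
  | none => []  -- Python raises here (range(report[0]) on a string, or IndexError on []); excluded by Pre_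
  | some cs =>
    let s : PySem.Set Int := PySem.Set.ofList cs
    let counters : PySem.Dict Int (PySem.Dict String Int) :=
      s.foldl (fun d c => d.insert c PySem.Dict.empty) PySem.Dict.empty
    let final : PySem.Dict Int (PySem.Dict String Int) :=
      report.foldl (fun d row => (PySem.List.enumerate row.toList).foldl (pvStepA s) d) counters
    final.items.map (fun p => (p.1, p.2.items))

-- ===== PORT B =====
-- the generator 'row[c] for row in report if 0 <= c < len(row)' of Source B
def pvColCells (report : List String) (c : Int) : List String :=
  report.filterMap (fun row =>
    if 0 ≤ c ∧ c < (row.toList.length : Int)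
    then some (String.ofList [row.toList.getD c.toNat ' ']) else none)

def get_column_occurrences_alt (report : List String) (column_set : Option (List Int)) :
    List (Int × List (String × Int)) :=
  match column_set with
  | none => []  -- same None branch as A: Python raises; excluded by Pre_
  | some cs =>
    (PySem.Set.ofList cs).map (fun c => (c, (PySem.Dict.counter (pvColCells report c)).items))

-- ===== PRECONDITION & SPEC =====
-- Pre_ excludes only column_set = None, on which both Pythons raise (range(report[0]) is a
-- TypeError on a string row, an IndexError on an empty report); no returning input is excluded.
def Pre_get_column_occurrences (report : List String) (column_set : Option (List Int)) : Prop :=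
  column_set.isSome = true
instance (report : List String) (column_set : Option (List Int)) : Decidable (Pre_get_column_occurrences report column_set) := by unfold Pre_get_column_occurrences; infer_instance

def pvWitness_get_column_occurrences : List String × Option (List Int) := (["ab", "cb"], some [0, 1, 5])

def Spec_get_column_occurrences (report : List String) (column_set : Option (List Int)) (out : List (Int × List (String × Int))) : Prop := out = get_column_occurrences_alt report column_set
instance (report : List String) (column_set : Option (List Int)) (out : List (Int × List (String × Int))) : Decidable (Spec_get_column_occurrences report column_set out) := by unfold Spec_get_column_occurrences; infer_instance

-- ===== CLAIM (what is proved, stated in full; the proofs are below) =====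
def Claim_equal_get_column_occurrences : Prop := ∀ (report : List String) (column_set : Option (List Int)), Dom_get_column_occurrences report column_set → Pre_get_column_occurrences report column_set → Spec_get_column_occurrences report column_set (get_column_occurrences report column_set)

-- ===== LEMMAS AND PROOFS =====

-- set(xs) of an already-duplicate-free list is itself
lemma pvFoldl_add_of_fresh (xs : List Int) : ∀ (s : PySem.Set Int), xs.Nodup →
    (∀ x ∈ xs, x ∉ s) → xs.foldl PySem.Set.add s = s ++ xs := by
  induction xs with
  | nil => intro s _ _; simp
  | cons x xs ih =>
    intro s hnd hfresh
    have hx : x ∉ s := hfresh x (by simp)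
    have hadd : PySem.Set.add s x = s ++ [x] := by simp [PySem.Set.add, hx]
    rw [List.foldl_cons, hadd, ih (s ++ [x]) hnd.of_cons]
    · simp
    · intro y hy
      simp only [List.mem_append, List.mem_singleton]
      rintro (hmem | rfl)
      · exact hfresh y (by simp [hy]) hmem
      · exact (List.nodup_cons.mp hnd).1 hy

-- set(xs) of an already-duplicate-free list is itself
lemma pvOfList_self (xs : List Int) (h : xs.Nodup) : PySem.Set.ofList xs = xs := by
  rw [PySem.Set.ofList_eq_foldl, pvFoldl_add_of_fresh xs [] h (by simp)]
  simp

-- the initial dict {c: Counter() for c in s} maps everything to the empty counter under getD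
lemma pvInit_getD (l : List Int) (d : PySem.Dict Int (PySem.Dict String Int))
    (hd : ∀ k, d.getD k PySem.Dict.empty = PySem.Dict.empty) (c : Int) :
    (l.foldl (fun d c => d.insert c PySem.Dict.empty) d).getD c PySem.Dict.empty
      = PySem.Dict.empty := by
  induction l generalizing d with
  | nil => exact hd c
  | cons x xs ih =>
    refine ih _ (fun k => ?_)
    rw [PySem.Dict.getD_insert]
    split <;> simp [hd]

-- one row of A's loop: what the fold over enumerate(row) does to the counter of column c
lemma pvRow_getD (s : PySem.Set Int) (chars : List Char) (s0 : Int)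
    (d : PySem.Dict Int (PySem.Dict String Int)) (c : Int) :
    ((PySem.List.enumerate chars s0).foldl (pvStepA s) d).getD c PySem.Dict.empty
      = if c ∈ s ∧ s0 ≤ c ∧ c < s0 + chars.length then
          (d.getD c PySem.Dict.empty).modify (String.ofList [chars.getD (c - s0).toNat ' ']) 0 (· + 1)
        else d.getD c PySem.Dict.empty := by
  induction chars generalizing s0 d with
  | nil => simp [PySem.List.enumerate_nil]
  | cons x xs ih =>
    rw [PySem.List.enumerate_cons, List.foldl_cons, ih]
    have hstep : (pvStepA s d (s0, x)).getD c PySem.Dict.empty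
        = if c ∈ s ∧ c = s0 then
            (d.getD c PySem.Dict.empty).modify (String.ofList [x]) 0 (· + 1)
          else d.getD c PySem.Dict.empty := by
      unfold pvStepA
      dsimp only
      by_cases hs0 : s0 ∈ s
      · rw [if_pos ((PySem.Set.contains_iff s s0).mpr hs0), PySem.Dict.getD_modify]
        by_cases hce : c = s0
        · subst hce
          rw [if_pos rfl, if_pos ⟨hs0, rfl⟩]
        · rw [if_neg hce, if_neg (show ¬ (c ∈ s ∧ c = s0) from fun h => hce h.2)]
      · have h1 : ¬ PySem.Set.contains s s0 = true :=
          fun h => hs0 ((PySem.Set.contains_iff s s0).mp h)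
        rw [if_neg h1, if_neg (show ¬ (c ∈ s ∧ c = s0) from fun h => hs0 (h.2 ▸ h.1))]
    rw [hstep]
    by_cases hcs : c ∈ s
    · simp only [hcs, true_and, List.length_cons]
      by_cases hce : c = s0
      · subst hce
        rw [if_neg (by omega), if_pos rfl, if_pos (by push_cast; omega)]
        simp
      · by_cases hin : s0 + 1 ≤ c ∧ c < s0 + 1 + (xs.length : Int)
        · rw [if_pos hin, if_neg hce, if_pos (by push_cast; omega)]
          have hgt : (c - s0).toNat = (c - (s0 + 1)).toNat + 1 := by omega
          simp [hgt]
        · rw [if_neg hin, if_neg hce, if_neg (by push_cast; omega)]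
    · have hfalse : ∀ (P : Prop), ¬ (c ∈ s ∧ P) := fun P h => hcs h.1
      rw [if_neg (hfalse _), if_neg (hfalse _), if_neg (hfalse _)]

-- all rows of A's loop, at one selected column c: the same as folding B's cell list of column c
lemma pvRows_getD (s : PySem.Set Int) (rows : List String)
    (d : PySem.Dict Int (PySem.Dict String Int)) (c : Int) (hc : c ∈ s) :
    ((rows.foldl (fun d row => (PySem.List.enumerate row.toList).foldl (pvStepA s) d) d).getD c PySem.Dict.empty)
      = (pvColCells rows c).foldl (fun cnt x => cnt.modify x 0 (· + 1)) (d.getD c PySem.Dict.empty) := by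
  induction rows generalizing d with
  | nil => simp [pvColCells]
  | cons row rest ih =>
    rw [List.foldl_cons, ih, pvRow_getD]
    by_cases hin : 0 ≤ c ∧ c < (row.toList.length : Int)
    · rw [if_pos ⟨hc, hin.1, by omega⟩]
      have hcells : pvColCells (row :: rest) c
          = String.ofList [row.toList.getD c.toNat ' '] :: pvColCells rest c := by
        simp only [pvColCells, List.filterMap_cons, if_pos hin]
      rw [hcells, List.foldl_cons]
      have h0 : c - 0 = c := by omega
      rw [h0]
    · have hneg : ¬ (c ∈ s ∧ 0 ≤ c ∧ c < 0 + (row.toList.length : Int)) := by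
        intro h
        exact hin ⟨h.2.1, by have := h.2.2; omega⟩
      rw [if_neg hneg]
      have hcells : pvColCells (row :: rest) c = pvColCells rest c := by
        simp only [pvColCells, List.filterMap_cons, if_neg hin]
      rw [hcells]

-- A's inner loop never changes the key list once it equals the column set
lemma pvRow_keys (s : PySem.Set Int) (chars : List Char) (s0 : Int)
    (d : PySem.Dict Int (PySem.Dict String Int)) (h : d.keys = s) :
    ((PySem.List.enumerate chars s0).foldl (pvStepA s) d).keys = s := by
  induction chars generalizing s0 d with
  | nil => simpa [PySem.List.enumerate_nil]
  | cons x xs ih =>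
    rw [PySem.List.enumerate_cons, List.foldl_cons]
    refine ih _ _ ?_
    unfold pvStepA
    split
    · next hs =>
      rw [PySem.Dict.keys_modify, PySem.Dict.keys_insert_of_contains]
      · exact h
      · rw [PySem.Dict.contains_iff_mem_keys, h]
        exact (PySem.Set.contains_iff s _).mp hs
    · exact h

lemma pvRows_keys (s : PySem.Set Int) (rows : List String)
    (d : PySem.Dict Int (PySem.Dict String Int)) (h : d.keys = s) :
    ((rows.foldl (fun d row => (PySem.List.enumerate row.toList).foldl (pvStepA s) d) d).keys) = s := by
  induction rows generalizing d with
  | nil => exact h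
  | cons row rest ih => exact ih _ (pvRow_keys s row.toList 0 d h)

-- ===== VERDICT (by name: the statement is the Claim_ definition above) =====
theorem get_column_occurrences_spec : Claim_equal_get_column_occurrences := by
  intro report column_set _ hpre
  unfold Spec_get_column_occurrences
  match column_set with
  | none => simp [Pre_get_column_occurrences] at hpre
  | some cs =>
    unfold get_column_occurrences get_column_occurrences_alt
    simp only
    set s : PySem.Set Int := PySem.Set.ofList cs with hs
    have hnodup : s.Nodup := PySem.Set.nodup_ofList cs
    set d0 : PySem.Dict Int (PySem.Dict String Int) :=
      s.foldl (fun d c => d.insert c PySem.Dict.empty) PySem.Dict.empty with hd0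
    set final : PySem.Dict Int (PySem.Dict String Int) :=
      report.foldl (fun d row => (PySem.List.enumerate row.toList).foldl (pvStepA s) d) d0 with hfinal
    have hd0keys : d0.keys = s := by
      rw [hd0, PySem.Dict.keys_foldl_insert, PySem.Set.update_eq_append_filter]
      simp [pvOfList_self s hnodup, PySem.Set.contains]
    have hd0getD : ∀ k, d0.getD k PySem.Dict.empty = PySem.Dict.empty := by
      intro k
      exact pvInit_getD s PySem.Dict.empty (fun k => PySem.Dict.getD_empty k _) k
    have hkeys : final.keys = s := pvRows_keys s report d0 hd0keys
    have hitems : final.items = s.map (fun c => (c, final.getD c PySem.Dict.empty)) := by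
      rw [PySem.Dict.items_eq_map_keys final (by rw [hkeys]; exact hnodup) PySem.Dict.empty, hkeys]
    rw [hitems, List.map_map]
    refine List.map_congr_left (fun c hcmem => ?_)
    have hgd := pvRows_getD s report d0 c hcmem
    rw [hd0getD c, ← hfinal] at hgd
    simp only [Function.comp_def, hgd, PySem.Dict.counter_eq_foldl]
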